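-- pv_equiv track=rewrite | github.com/mitsuo0114/competitive_programming | python/atcoder/Beginner043/D.py | solve
-- ===== SOURCE A (Python) =====
-- def solve(s):
--     for i, j in zip(range(0, len(s) - 1), range(1, len(s))):
--         if s[i] == s[j]:
--             return "%d %d" % (i + 1, j + 1)
--
--     for i, j in zip(range(0, len(s) - 2), range(2, len(s))):
--         if s[i] == s[j]:
--             return "%d %d" % (i + 1, j + 1)
--
--     return "%d %d" % (-1, -1)
-- ===== SOURCE B (Python) =====
-- def solve(s):
--     n = len(s)
--     cand = None
--     for i in range(n - 1):
--         if s[i] == s[i + 1]: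
--             return "%d %d" % (i + 1, i + 2)
--         if cand is None and i + 2 < n and s[i] == s[i + 2]:
--             cand = i
--     if cand is not None:
--         return "%d %d" % (cand + 1, cand + 3)
--     return "-1 -1"
-- ===== Notes on version B (the rewrite author's own statement) =====
-- stated objective: alternative
-- what changed: A makes two sequential passes (all distance-1 pairs, then all distance-2 pairs); B makes one pass that returns immediately on the first distance-1 match while recording the leftmost distance-2 match as pending state, used only if no distance-1 match exists.
import Mathlib
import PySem

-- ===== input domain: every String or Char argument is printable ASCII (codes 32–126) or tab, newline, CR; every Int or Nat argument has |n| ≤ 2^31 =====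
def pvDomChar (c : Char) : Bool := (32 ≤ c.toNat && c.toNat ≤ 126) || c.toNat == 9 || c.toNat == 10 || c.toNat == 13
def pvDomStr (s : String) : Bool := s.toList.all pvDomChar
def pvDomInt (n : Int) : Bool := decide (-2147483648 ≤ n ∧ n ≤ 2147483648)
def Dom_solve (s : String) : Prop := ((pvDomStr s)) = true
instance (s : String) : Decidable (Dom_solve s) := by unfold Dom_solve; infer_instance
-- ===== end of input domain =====

-- B collapses A's two sequential passes into one pass that returns on the first
-- distance-1 match and keeps the leftmost distance-2 match as pending state (alternative decomposition).


-- ===== PORT A =====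
-- "%d %d" % (i, j)
def fmtPair (i j : Int) : String := PySem.Int.toStr i ++ " " ++ PySem.Int.toStr j

-- A's first loop: scan consecutive index pairs (i, i+1), return first i with s[i] == s[i+1]
def aLoop1 : List Char → Int → Option Int
  | a :: b :: rest, i => if a == b then some i else aLoop1 (b :: rest) (i + 1)
  | _, _ => none

-- A's second loop: scan index pairs (i, i+2), return first i with s[i] == s[i+2]
def aLoop2 : List Char → Int → Option Int
  | a :: b :: c :: rest, i => if a == c then some i else aLoop2 (b :: c :: rest) (i + 1)
  | _, _ => none

def solve (s : String) : String :=
  match aLoop1 s.toList 0 with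
  | some i => fmtPair (i + 1) (i + 2)
  | none =>
    match aLoop2 s.toList 0 with
    | some i => fmtPair (i + 1) (i + 3)
    | none => fmtPair (-1) (-1)

-- ===== PORT B =====
-- B's single loop: return at the first distance-1 match; otherwise remember the
-- leftmost distance-2 match in `cand` and use it after the loop.
def bLoop : List Char → Int → Option Int → String
  | a :: b :: rest, i, cand =>
    if a == b then fmtPair (i + 1) (i + 2)
    else
      let cand' : Option Int :=
        match cand, rest with
        | none, c :: _ => if a == c then some i else none
        | _, _ => cand
      bLoop (b :: rest) (i + 1) cand'
  | _, _, cand =>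
    match cand with
    | some k => fmtPair (k + 1) (k + 3)
    | none => "-1 -1"

def solve_alt (s : String) : String := bLoop s.toList 0 none

-- ===== PRECONDITION & SPEC =====
def Spec_solve (s : String) (out : String) : Prop := out = solve_alt s
instance (s : String) (out : String) : Decidable (Spec_solve s out) := by unfold Spec_solve; infer_instance

-- ===== CLAIM (what is proved, stated in full; the proofs are below) =====
def Claim_equal_solve : Prop := ∀ (s : String), Dom_solve s → Spec_solve s (solve s)

-- ===== LEMMAS AND PROOFS =====

theorem bLoop_of_loop1_some (cs : List Char) (i k : Int) (cand : Option Int)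
    (h : aLoop1 cs i = some k) : bLoop cs i cand = fmtPair (k + 1) (k + 2) := by
  induction cs generalizing i cand with
  | nil => simp [aLoop1] at h
  | cons a t ih =>
    cases t with
    | nil => simp [aLoop1] at h
    | cons b rest =>
      by_cases hab : a == b
      · simp [aLoop1, hab] at h
        simp [bLoop, hab, h]
      · simp [aLoop1, hab] at h
        simpa [bLoop, hab] using ih (i + 1) _ h

theorem bLoop_of_loop1_none (cs : List Char) (i : Int) (cand : Option Int)
    (h : aLoop1 cs i = none) :
    bLoop cs i cand =
      match cand.orElse (fun _ => aLoop2 cs i) with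
      | some k => fmtPair (k + 1) (k + 3)
      | none => "-1 -1" := by
  induction cs generalizing i cand with
  | nil => cases cand <;> simp [bLoop, aLoop2, Option.orElse]
  | cons a t ih =>
    cases t with
    | nil => cases cand <;> simp [bLoop, aLoop2, Option.orElse]
    | cons b rest =>
      by_cases hab : a == b
      · simp [aLoop1, hab] at h
      · simp [aLoop1, hab] at h
        have step := ih (i + 1)
        cases cand with
        | some k =>
          simpa [bLoop, hab, Option.orElse] using step (some k) h
        | none =>
          cases rest with
          | nil =>
            simp [bLoop, hab, aLoop2, Option.orElse]
          | cons c rest' =>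
            by_cases hac : a == c
            · simpa [bLoop, hab, hac, aLoop2, Option.orElse] using step (some i) h
            · simpa [bLoop, hab, hac, aLoop2, Option.orElse] using step none h

theorem fmt_neg : fmtPair (-1) (-1) = "-1 -1" := by decide

-- ===== VERDICT (by name: the statement is the Claim_ definition above) =====
theorem solve_spec : Claim_equal_solve := by
  intro s _
  unfold Spec_solve solve solve_alt
  cases h : aLoop1 s.toList 0 with
  | some k => rw [bLoop_of_loop1_some s.toList 0 k none h]
  | none =>
    rw [bLoop_of_loop1_none s.toList 0 none h]
    cases h2 : aLoop2 s.toList 0 <;> simp [Option.orElse, fmt_neg]
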